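-- pv_equiv track=rewrite | github.com/ThomasSanna/109-python-problems-for-ccps | 5-cyclops-numbers/5.py | is_cyclops
-- ===== SOURCE A (Python) =====
-- def is_cyclops(n):
--     longN = 0
--     tempN = n
--     while tempN > 0:
--         tempN = tempN // 10
--         longN += 1
--
--     if (longN % 2 == 0 and longN != 0) or n < 0:
--         return False
--     if longN == 0:
--         return True
--
--     boool = False
--
--     for i in range(longN):
--         if n // (10**i) % 10 != 0 and i == longN//2 :
--             return False
--         elif n // (10**i) % 10 == 0 and i != longN//2:
--             return False
--     return True
-- ===== SOURCE B (Python) =====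
-- def is_cyclops(n):
--     if n < 0:
--         return False
--     length = zeros = zpos = 0
--     while n > 0:
--         if n % 10 == 0:
--             zeros += 1
--             zpos = length
--         n //= 10
--         length += 1
--     if length == 0:
--         return True
--     return length % 2 == 1 and zeros == 1 and zpos == length // 2
-- ===== Notes on version B (the rewrite author's own statement) =====
-- stated objective: alternative
-- what changed: B is a single streaming pass that only accumulates summary statistics (digit count, zero count, position of the last zero) and then decides with the closed-form test 'odd length and exactly one zero and that zero is the middle', replacing A's two-phase scheme of a digit-count loop plus a positional scan that re-derives each digit with a freshly recomputed power of ten and does per-index middle/non-middle case analysis with early returns.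
import Mathlib
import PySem

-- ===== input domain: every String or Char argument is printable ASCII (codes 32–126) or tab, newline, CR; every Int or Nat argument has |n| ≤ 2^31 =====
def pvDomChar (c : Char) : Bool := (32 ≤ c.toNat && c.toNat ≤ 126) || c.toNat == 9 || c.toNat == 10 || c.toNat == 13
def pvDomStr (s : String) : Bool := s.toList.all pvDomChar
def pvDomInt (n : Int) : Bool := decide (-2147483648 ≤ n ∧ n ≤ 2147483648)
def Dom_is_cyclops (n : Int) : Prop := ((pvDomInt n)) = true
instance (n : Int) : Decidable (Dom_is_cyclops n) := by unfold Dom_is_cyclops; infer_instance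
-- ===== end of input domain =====

-- B makes a single streaming pass accumulating digit count, zero count and last-zero position,
-- then decides with the closed-form test "odd length, exactly one zero, and it is the middle",
-- instead of A's digit-count loop plus a positional scan re-deriving each digit arithmetically.


-- ===== PORT A =====
-- while tempN > 0: tempN //= 10; longN += 1
def pvCountA (t : Int) : Nat :=
  if h : t > 0 then pvCountA (PySem.Int.floordiv t 10) + 1 else 0
termination_by t.toNat
decreasing_by
  rw [PySem.Int.floordiv_eq_ediv_of_pos (by norm_num)]
  omega

-- for i in range(longN): the two early-return branches, else continue
def pvLoopA (n : Int) (L i : Nat) : Bool :=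
  if i < L then
    if PySem.Int.mod (PySem.Int.floordiv n ((10:Int)^i)) 10 != 0 && i == L / 2 then false
    else if PySem.Int.mod (PySem.Int.floordiv n ((10:Int)^i)) 10 == 0 && i != L / 2 then false
    else pvLoopA n L (i+1)
  else true
termination_by L - i

def is_cyclops (n : Int) : Bool :=
  let longN := pvCountA n
  if (longN % 2 == 0 && longN != 0) || n < 0 then false
  else if longN == 0 then true
  else pvLoopA n longN 0

-- ===== PORT B =====
-- while n > 0: if n % 10 == 0: zeros += 1; zpos = length; n //= 10; length += 1
def pvLoopB (t : Int) (length zeros zpos : Nat) : Nat × Nat × Nat :=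
  if _h : t > 0 then
    pvLoopB (PySem.Int.floordiv t 10) (length + 1)
      (if PySem.Int.mod t 10 == 0 then zeros + 1 else zeros)
      (if PySem.Int.mod t 10 == 0 then length else zpos)
  else (length, zeros, zpos)
termination_by t.toNat
decreasing_by
  rw [PySem.Int.floordiv_eq_ediv_of_pos (by norm_num)]
  omega

def is_cyclops_alt (n : Int) : Bool :=
  if n < 0 then false
  else
    let s := pvLoopB n 0 0 0
    if s.1 == 0 then true
    else s.1 % 2 == 1 && s.2.1 == 1 && s.2.2 == s.1 / 2

-- ===== PRECONDITION & SPEC =====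
def Spec_is_cyclops (n : Int) (out : Bool) : Prop := out = is_cyclops_alt n
instance (n : Int) (out : Bool) : Decidable (Spec_is_cyclops n out) := by unfold Spec_is_cyclops; infer_instance

-- ===== CLAIM (what is proved, stated in full; the proofs are below) =====
def Claim_equal_is_cyclops : Prop := ∀ (n : Int), Dom_is_cyclops n → Spec_is_cyclops n (is_cyclops n)

-- ===== LEMMAS AND PROOFS =====

-- proof-side helper: the digit list of t, least-significant digit first
def pvDigits (t : Int) : List Int :=
  if h : t > 0 then PySem.Int.mod t 10 :: pvDigits (PySem.Int.floordiv t 10) else []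
termination_by t.toNat
decreasing_by
  rw [PySem.Int.floordiv_eq_ediv_of_pos (by norm_num)]
  omega

-- proof-side helper: pvLoopB's scan, restated structurally on the digit list
def pvProc (ds : List Int) (a z p : Nat) : Nat × Nat × Nat :=
  match ds with
  | [] => (a, z, p)
  | d :: ds => pvProc ds (a + 1) (if d == 0 then z + 1 else z) (if d == 0 then a else p)

lemma pvLoopB_eq_pvProc (t : Int) (a z p : Nat) :
    pvLoopB t a z p = pvProc (pvDigits t) a z p := by
  fun_induction pvLoopB t a z p with
  | case1 t a z p h ih => rw [pvDigits, dif_pos h, pvProc]; exact ih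
  | case2 t a z p h => rw [pvDigits, dif_neg h, pvProc]

lemma len_pvDigits (t : Int) : (pvDigits t).length = pvCountA t := by
  fun_induction pvDigits t with
  | case1 t h ih => rw [pvCountA, dif_pos h]; simp only [List.length_cons, ih]
  | case2 t h => rw [pvCountA, dif_neg h]; simp [h]

lemma pvDigits_getD (t : Int) (i : Nat) (hi : i < (pvDigits t).length) :
    (pvDigits t).getD i 0 = PySem.Int.mod (PySem.Int.floordiv t ((10:Int)^i)) 10 := by
  induction i generalizing t with
  | zero =>
    rw [pvDigits] at hi ⊢
    by_cases h : t > 0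
    · simp [h, PySem.Int.floordiv]
    · simp [h] at hi
  | succ i ih =>
    rw [pvDigits] at hi ⊢
    by_cases h : t > 0
    · simp only [h, dif_pos] at hi ⊢
      simp only [List.getD_cons_succ]
      rw [ih _ (by simpa using hi)]
      congr 1
      rw [PySem.Int.floordiv_eq_ediv_of_pos (b := 10) (by norm_num),
          PySem.Int.floordiv_eq_ediv_of_pos (by positivity),
          PySem.Int.floordiv_eq_ediv_of_pos (by positivity)]
      rw [Int.ediv_ediv_of_nonneg (by norm_num : (0:Int) ≤ 10)]
      congr 1
      ring
    · simp [h] at hi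

lemma pvLoopA_iff (n : Int) (L i : Nat) :
    pvLoopA n L i = true ↔
      ∀ j, i ≤ j → j < L →
        (PySem.Int.mod (PySem.Int.floordiv n ((10:Int)^j)) 10 = 0 ↔ j = L / 2) := by
  fun_induction pvLoopA n L i with
  | case1 i hlt h1 =>
    simp only [Bool.false_eq_true, false_iff]
    intro hall
    simp only [bne_iff_ne, ne_eq, Bool.and_eq_true, beq_iff_eq] at h1
    have := (hall i le_rfl hlt).2 h1.2
    exact h1.1 this
  | case2 i hlt h1 h2 =>
    simp only [Bool.false_eq_true, false_iff]
    intro hall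
    simp only [Bool.and_eq_true, beq_iff_eq, bne_iff_ne, ne_eq] at h2
    exact h2.2 ((hall i le_rfl hlt).1 h2.1)
  | case3 i hlt h1 h2 ih =>
    rw [ih]
    simp only [Bool.and_eq_true, bne_iff_ne, ne_eq, beq_iff_eq, not_and,
      Decidable.not_not] at h1 h2
    constructor
    · intro hall j hij hjL
      rcases Nat.eq_or_lt_of_le hij with rfl | hlt'
      · constructor
        · intro hz; exact h2 hz
        · intro he; by_contra hz; exact (h1 hz) he
      · exact hall j hlt' hjL
    · intro hall j hij hjL
      exact hall j (Nat.le_of_succ_le hij) hjL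
  | case4 i hlt =>
    simp only [true_iff]
    intro j hij hjL
    exact absurd (Nat.lt_of_le_of_lt hij hjL) hlt

lemma pvProc_fst (ds : List Int) (a z p : Nat) : (pvProc ds a z p).1 = a + ds.length := by
  induction ds generalizing a z p with
  | nil => simp [pvProc]
  | cons d ds ih => rw [pvProc, ih]; simp; omega

lemma pvProc_zeros (ds : List Int) (a z p : Nat) :
    (pvProc ds a z p).2.1 = z + ds.count 0 := by
  induction ds generalizing a z p with
  | nil => simp [pvProc]
  | cons d ds ih =>
    rw [pvProc, ih]
    by_cases hd : d = 0 <;> simp [hd, List.count_cons] <;> try omega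

lemma pvProc_pos_nozero (ds : List Int) (a z p : Nat) (h : (0:Int) ∉ ds) :
    (pvProc ds a z p).2.2 = p := by
  induction ds generalizing a z p with
  | nil => rfl
  | cons d ds ih =>
    rw [pvProc]
    have hd : d ≠ 0 := fun hd => h (hd ▸ List.mem_cons_self ..)
    rw [ih _ _ _ (fun hm => h (List.mem_cons_of_mem _ hm))]
    simp [hd]

lemma pvProc_pos_split (D₁ D₂ : List Int) (a z p : Nat) (h₂ : (0:Int) ∉ D₂) :
    (pvProc (D₁ ++ 0 :: D₂) a z p).2.2 = a + D₁.length := by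
  induction D₁ generalizing a z p with
  | nil =>
    simp only [List.nil_append, pvProc]
    rw [pvProc_pos_nozero _ _ _ _ h₂]
    simp
  | cons d D₁ ih =>
    rw [List.cons_append, pvProc, ih]
    simp; omega

lemma exists_last_zero (D : List Int) (h : (0:Int) ∈ D) :
    ∃ D₁ D₂, D = D₁ ++ 0 :: D₂ ∧ (0:Int) ∉ D₂ := by
  induction D with
  | nil => cases h
  | cons d ds ih =>
    by_cases hm : (0:Int) ∈ ds
    · obtain ⟨D₁, D₂, hE, hn⟩ := ih hm
      exact ⟨d :: D₁, D₂, by rw [hE]; rfl, hn⟩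
    · have hd : d = 0 := by
        rcases List.mem_cons.mp h with h' | h'
        · exact h'.symm
        · exact absurd h' hm
      exact ⟨[], ds, by simp [hd], hm⟩

lemma getD_zero_iff_of_split (D₁ D₂ : List Int) (h₁ : (0:Int) ∉ D₁) (h₂ : (0:Int) ∉ D₂)
    (j : Nat) (hj : j < (D₁ ++ 0 :: D₂).length) :
    ((D₁ ++ 0 :: D₂).getD j 0 = 0 ↔ j = D₁.length) := by
  simp only [List.length_append, List.length_cons] at hj
  constructor
  · intro hz
    by_contra hne
    rcases Nat.lt_or_ge j D₁.length with hlt | hge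
    · rw [List.getD_append _ _ _ _ hlt, List.getD_eq_getElem _ _ hlt] at hz
      exact h₁ (hz ▸ List.getElem_mem _)
    · have hgt : D₁.length < j := lt_of_le_of_ne hge (fun h => hne h.symm)
      obtain ⟨k, hk⟩ : ∃ k, j - D₁.length = k + 1 := ⟨j - D₁.length - 1, by omega⟩
      rw [List.getD_append_right _ _ _ _ hge, hk, List.getD_cons_succ,
          List.getD_eq_getElem _ _ (by omega)] at hz
      exact h₂ (hz ▸ List.getElem_mem _)
  · intro hj'
    subst hj'
    rw [List.getD_append_right _ _ _ _ (le_refl _)]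
    simp

-- the heart: for n > 0 with L = digit count, A's positional scan equals B's summary test
lemma scan_eq_summary (n : Int) (L : Nat) (hL : L = pvCountA n) (hLpos : L ≠ 0) :
    (pvLoopA n L 0 = ((pvLoopB n 0 0 0).2.1 == 1 && (pvLoopB n 0 0 0).2.2 == L / 2)) := by
  set D := pvDigits n with hD
  have hlen : D.length = L := by rw [hD, len_pvDigits, hL]
  have hlen' : (pvDigits n).length = L := by rw [← hD]; exact hlen
  have hmid : L / 2 < L := by omega
  have hiff : pvLoopA n L 0 = true ↔ ∀ j, j < L → (D.getD j 0 = 0 ↔ j = L / 2) := by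
    rw [pvLoopA_iff]
    constructor
    · intro h j hj
      rw [pvDigits_getD n j (by omega)]
      exact h j (Nat.zero_le _) hj
    · intro h j _ hj
      rw [← pvDigits_getD n j (by omega)]
      exact h j hj
  rw [pvLoopB_eq_pvProc, pvProc_zeros, Nat.zero_add]
  by_cases hz : (0:Int) ∈ D
  · obtain ⟨D₁, D₂, hE, h₂⟩ := exists_last_zero D hz
    have hDlen : D₁.length + D₂.length + 1 = L := by
      have := congrArg List.length hE
      simp at this
      omega
    by_cases h₁ : (0:Int) ∈ D₁
    · -- at least two zeros: both sides false
      have hc : 2 ≤ D.count 0 := by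
        rw [hE, List.count_append, List.count_cons]
        have : 1 ≤ D₁.count 0 := List.one_le_count_iff.mpr h₁
        simp
        omega
      have hright : (D.count 0 == 1) = false := by simp; omega
      rw [hright, Bool.false_and]
      rw [Bool.eq_iff_iff, hiff]
      simp only [Bool.false_eq_true, iff_false]
      intro hall
      obtain ⟨E₁, E₂, hE', h₂'⟩ := exists_last_zero D₁ h₁
      have hj1 : E₁.length < D₁.length := by rw [hE']; simp
      have g1 : D.getD E₁.length 0 = 0 := by
        rw [hE, List.getD_append _ _ _ _ hj1, hE',
            List.getD_append_right _ _ _ _ (le_refl _)]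
        simp
      have g2 : D.getD D₁.length 0 = 0 := by
        rw [hE, List.getD_append_right _ _ _ _ (le_refl _)]
        simp
      have e1 := (hall _ (by omega)).mp g1
      have e2 := (hall _ (by omega)).mp g2
      omega
    · -- exactly one zero, at index D₁.length
      have hc : D.count 0 = 1 := by
        rw [hE, List.count_append, List.count_cons]
        have u1 : D₁.count 0 = 0 := by simpa using List.count_eq_zero.mpr h₁
        have u2 : D₂.count 0 = 0 := by simpa using List.count_eq_zero.mpr h₂
        simp [u1, u2]
      rw [hc]
      have hp : (pvProc D 0 0 0).2.2 = D₁.length := by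
        rw [hE, pvProc_pos_split _ _ _ _ _ h₂]
        omega
      rw [hp]
      rw [Bool.eq_iff_iff, hiff]
      simp only [beq_self_eq_true, Bool.true_and, beq_iff_eq]
      constructor
      · intro hall
        have h0 : D.getD D₁.length 0 = 0 := by
          rw [hE, List.getD_append_right _ _ _ _ (le_refl _)]
          simp
        have := (hall D₁.length (by omega)).mp h0
        omega
      · intro heq j hj
        rw [hE, getD_zero_iff_of_split D₁ D₂ h₁ h₂ j (by simp; omega)]
        omega
  · -- no zero digit: both sides false
    have hc : D.count 0 = 0 := List.count_eq_zero.mpr hz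
    have hright : (D.count 0 == 1) = false := by simp [hc]
    rw [hright, Bool.false_and]
    rw [Bool.eq_iff_iff, hiff]
    simp only [Bool.false_eq_true, iff_false]
    intro hall
    have := (hall (L/2) hmid).mpr rfl
    have hmem : D.getD (L/2) 0 ∈ D := by
      rw [List.getD_eq_getElem _ _ (by omega)]
      exact List.getElem_mem _
    rw [this] at hmem
    exact hz hmem

-- ===== VERDICT (by name: the statement is the Claim_ definition above) =====
theorem is_cyclops_spec : Claim_equal_is_cyclops := by
  intro n _
  unfold Spec_is_cyclops is_cyclops is_cyclops_alt
  by_cases hneg : n ≤ 0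
  · have hc : pvCountA n = 0 := by rw [pvCountA]; simp; omega
    have hb : pvLoopB n 0 0 0 = (0, 0, 0) := by rw [pvLoopB]; simp; omega
    by_cases h0 : n = 0
    · subst h0; simp [hc, hb]
    · have : n < 0 := lt_of_le_of_ne hneg h0
      simp [hc, this, h0]
  · have hneg : 0 < n := by omega
    have hnotlt : ¬ n < 0 := by omega
    set L := pvCountA n with hL
    have hLpos : L ≠ 0 := by
      rw [hL, pvCountA]; simp [hneg]
    have hlenB : (pvLoopB n 0 0 0).1 = L := by
      rw [pvLoopB_eq_pvProc, pvProc_fst, len_pvDigits]; omega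
    rw [if_neg hnotlt]
    by_cases hev : L % 2 = 0
    · have e1 : ((L % 2 == 0 && L != 0) || decide (n < 0)) = true := by
        simp [hev, hLpos]
      have e3 : ((pvLoopB n 0 0 0).1 == 0) = false := by simp [hlenB, hLpos]
      have e4 : ((pvLoopB n 0 0 0).1 % 2 == 1) = false := by simp [hlenB]; omega
      simp only [e1, if_pos, e3, Bool.false_eq_true, if_false, e4, Bool.false_and]
    · have e1 : ((L % 2 == 0 && L != 0) || decide (n < 0)) = false := by
        simp [hev, hnotlt]
      have e2 : (L == 0) = false := by simp [hLpos]
      have e3 : ((pvLoopB n 0 0 0).1 == 0) = false := by simp [hlenB, hLpos]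
      have e4 : ((pvLoopB n 0 0 0).1 % 2 == 1) = true := by simp [hlenB]; omega
      simp only [e1, Bool.false_eq_true, if_false, e2, e3, e4, Bool.true_and]
      rw [hlenB]
      exact scan_eq_summary n L hL hLpos
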